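-- pv_equiv track=rewrite | github.com/Wontae-Lee/fortran_vscode_settings | scripts/change_statement.py | return_extracted_word
-- ===== SOURCE A (Python) =====
-- def find_all_substring_indices(input_string, target_substring):
--     indices = [0]
--     index = input_string.find(target_substring)
--     while index != -1:
--         indices.append(index)
--         index = input_string.find(target_substring, index + 1)
--     return indices
--
-- def return_extracted_word(new_string):
--     indices = find_all_substring_indices(new_string, target_substring="*")
--     indices_length = len(indices)
--
--     extracted_word = []
--     for idx in range(indices_length):
--
--         if idx + 1 == indices_length:
--             extracted_word.append(new_string[indices[idx]:].replace("*", ""))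
--
--             break
--         extracted_word.append(new_string[indices[idx]:indices[idx + 1]].replace("*", ""))
--
--     return extracted_word
-- ===== SOURCE B (Python) =====
-- def return_extracted_word(new_string):
--     extracted_word = []
--     buffer = []
--     for ch in new_string:
--         if ch == "*":
--             extracted_word.append("".join(buffer))
--             buffer = []
--         else:
--             buffer.append(ch)
--     extracted_word.append("".join(buffer))
--     return extracted_word
-- ===== Notes on version B (the rewrite author's own statement) =====
-- stated objective: simpler
-- what changed: Single left-to-right character scan with a segment buffer, instead of first building a table of all '*' indices via repeated str.find and then slicing between consecutive indices with replace('*','') on each slice.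
import Mathlib
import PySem

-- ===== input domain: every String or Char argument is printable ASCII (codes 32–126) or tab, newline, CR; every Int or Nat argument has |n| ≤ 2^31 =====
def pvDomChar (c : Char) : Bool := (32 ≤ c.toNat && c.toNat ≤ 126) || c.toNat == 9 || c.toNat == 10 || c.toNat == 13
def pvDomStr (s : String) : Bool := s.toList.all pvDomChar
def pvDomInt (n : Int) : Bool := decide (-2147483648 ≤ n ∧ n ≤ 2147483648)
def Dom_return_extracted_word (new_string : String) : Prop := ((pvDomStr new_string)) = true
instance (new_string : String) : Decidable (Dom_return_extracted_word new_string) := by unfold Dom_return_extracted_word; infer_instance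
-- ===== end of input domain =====

-- B replaces A's two-phase "collect all '*' indices with repeated str.find, then slice between
-- consecutive indices and strip '*' from each slice" by a single character scan with a segment buffer.

-- ===== PORT A =====
-- the while loop of find_all_substring_indices; fuel only makes the recursion total
-- (cs.length + 1 fuel is proved sufficient below), each step is Python's
-- `index = input_string.find("*", index + 1)`
def pvFindLoop (cs : List Char) : Nat → Int → List Int
  | 0, _ => []
  | fuel + 1, index =>
      if index = -1 then []
      else index :: pvFindLoop cs fuel (PySem.Chars.findFrom cs ['*'] (index + 1))

-- find_all_substring_indices(new_string, "*"): indices = [0] then the while loop,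
-- first index from new_string.find("*")
def pvFindAll (cs : List Char) : List Int :=
  (0 : Int) :: pvFindLoop cs (cs.length + 1) (PySem.Chars.find cs ['*'])

-- the `for idx in range(indices_length)` loop: on the last index, slice to the end and break;
-- otherwise slice to the next index; each slice gets .replace("*", "")
def pvExtract (cs : List Char) : List Int → List String
  | [] => []
  | [i] => [String.mk (PySem.Chars.replace (PySem.Chars.slice cs (some i) none) ['*'] [])]
  | i :: j :: rest =>
      String.mk (PySem.Chars.replace (PySem.Chars.slice cs (some i) (some j)) ['*'] [])
        :: pvExtract cs (j :: rest)

def return_extracted_word (new_string : String) : List String :=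
  pvExtract new_string.toList (pvFindAll new_string.toList)

-- ===== PORT B =====
-- one step of B's for-loop: on '*' flush the buffer into the result, else extend the buffer
def pvStep (st : List String × List Char) (ch : Char) : List String × List Char :=
  if ch = '*' then (st.1 ++ [String.mk st.2], []) else (st.1, st.2 ++ [ch])

def return_extracted_word_alt (new_string : String) : List String :=
  let st := new_string.toList.foldl pvStep ([], [])
  st.1 ++ [String.mk st.2]

-- ===== PRECONDITION & SPEC =====
def Spec_return_extracted_word (new_string : String) (out : List String) : Prop := out = return_extracted_word_alt new_string
instance (new_string : String) (out : List String) : Decidable (Spec_return_extracted_word new_string out) := by unfold Spec_return_extracted_word; infer_instance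

-- ===== CLAIM (what is proved, stated in full; the proofs are below) =====
def Claim_equal_return_extracted_word : Prop := ∀ (new_string : String), Dom_return_extracted_word new_string → Spec_return_extracted_word new_string (return_extracted_word new_string)

-- ===== LEMMAS AND PROOFS =====

-- reference split: first segment (up to the first '*') and the remaining segments
def pvSp : List Char → List Char × List (List Char)
  | [] => ([], [])
  | c :: cs => if c = '*' then ([], (pvSp cs).1 :: (pvSp cs).2)
               else (c :: (pvSp cs).1, (pvSp cs).2)

-- positions (≥ offset k) of '*' in cs.drop k, as Ints
def pvStars : List Char → Nat → List Int
  | [], _ => []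
  | c :: cs, k => if c = '*' then (k : Int) :: pvStars cs (k + 1) else pvStars cs (k + 1)

theorem pvSp_no_star (u : List Char) : '*' ∉ (pvSp u).1 := by
  induction u with
  | nil => simp [pvSp]
  | cons c cs ih =>
      by_cases h : c = '*' <;> simp [pvSp, h, ih]
      exact fun he => h he.symm

theorem pvSp_fst_no_star (u : List Char) :
    ((pvSp u).1).filter (fun x => !decide (x = '*')) = (pvSp u).1 := by
  apply List.filter_eq_self.mpr
  intro a ha
  simp only [Bool.not_eq_eq_eq_not, Bool.not_true, decide_eq_false_iff_not]
  intro he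
  exact pvSp_no_star u (he ▸ ha)

theorem pvRepGo (l : List Char) : ∀ (fuel : Nat) (acc : List Char), l.length ≤ fuel →
    PySem.Chars.replace.go ['*'] [] fuel l acc = acc.reverse ++ l.filter (· ≠ '*') := by
  induction l with
  | nil => intro fuel acc h; cases fuel <;> simp [PySem.Chars.replace.go]
  | cons c t ih =>
      intro fuel acc h
      cases fuel with
      | zero => simp at h
      | succ f =>
          by_cases hc : c = '*'
          · subst hc
            simp only [PySem.Chars.replace.go, List.isPrefixOf, BEq.rfl, Bool.true_and, if_pos]
            have hgo : PySem.Chars.replace.go ['*'] [] f (List.drop ['*'].length ('*' :: t)) ([].reverse ++ acc)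
                = PySem.Chars.replace.go ['*'] [] f t acc := by norm_num
            rw [hgo, ih f acc (by simpa using h)]
            simp
          · have : ¬ (List.isPrefixOf ['*'] (c :: t) = true) := by
              simp [List.isPrefixOf]; exact fun hh => hc hh.symm
            simp only [PySem.Chars.replace.go, this, if_neg, Bool.not_eq_true]
            rw [ih f (c :: acc) (by simpa using h)]
            simp [hc]

theorem pvRepFilter (l : List Char) : PySem.Chars.replace l ['*'] [] = l.filter (· ≠ '*') := by
  rw [PySem.Chars.replace]
  simp only [List.isEmpty_cons]
  exact pvRepGo l l.length [] le_rfl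

theorem pvSingletonInfix (a : Char) (l : List Char) : [a] <:+: l ↔ a ∈ l := by
  constructor
  · rintro ⟨s, t, rfl⟩; simp
  · intro h
    obtain ⟨s, t, rfl⟩ := List.append_of_mem h
    exact ⟨s, t, by simp⟩

theorem pvStars_no_star (u : List Char) : ∀ k, '*' ∉ u → pvStars u k = [] := by
  induction u with
  | nil => intro k _; rfl
  | cons c cs ih =>
      intro k h
      simp only [List.mem_cons, not_or] at h
      simp [pvStars, Ne.symm h.1, ih (k + 1) h.2]

theorem pvStars_append (p : List Char) : ∀ (v : List Char) (k : Nat), '*' ∉ p →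
    pvStars (p ++ v) k = pvStars v (k + p.length) := by
  induction p with
  | nil => intro v k _; simp
  | cons c p ih =>
      intro v k h
      simp only [List.mem_cons, not_or] at h
      simp only [List.cons_append, pvStars, if_neg (Ne.symm h.1)]
      rw [ih v (k + 1) h.2]
      congr 1
      simp [List.length_cons]; omega

theorem pvDropCons (u : List Char) (i : Nat) (h : u[i]? = some '*') :
    u.drop i = '*' :: u.drop (i + 1) := by
  have hi : i < u.length := by
    by_contra hc
    simp [List.getElem?_eq_none (by omega : u.length ≤ i)] at h
  rw [List.drop_eq_getElem_cons hi]
  have h2 : u[i] = '*' := by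
    have hg := List.getElem?_eq_getElem hi
    rw [hg] at h
    injection h
  rw [h2]

theorem pvLoop_eq (cs : List Char) : ∀ (fuel k : Nat), k ≤ cs.length → cs.length - k < fuel →
    pvFindLoop cs fuel (PySem.Chars.findFrom cs ['*'] (k : Int)) = pvStars (cs.drop k) k := by
  intro fuel
  induction fuel with
  | zero => intro k _ hf; omega
  | succ f ih =>
      intro k hk hf
      rw [PySem.Chars.findFrom_natCast cs ['*'] k hk]
      by_cases hfind : PySem.Chars.find (cs.drop k) ['*'] = -1
      · have hns : '*' ∉ cs.drop k := fun hmem =>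
          ((PySem.Chars.find_eq_neg_one_iff _ _).mp hfind) ((pvSingletonInfix '*' _).mpr hmem)
        rw [if_pos hfind]
        simp [pvFindLoop, pvStars_no_star _ _ hns]
      · rw [if_neg hfind]
        set u := cs.drop k with hu
        have hj0 : 0 ≤ PySem.Chars.find u ['*'] := by
          have := PySem.Chars.neg_one_le_find u ['*']
          omega
        set jn := (PySem.Chars.find u ['*']).toNat with hjn
        have hjcast : PySem.Chars.find u ['*'] = (jn : Int) := by
          rw [hjn, Int.toNat_of_nonneg hj0]
        obtain ⟨hpre, hmin⟩ := PySem.Chars.find_spec (s := u) (sub := ['*']) hj0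
        obtain ⟨w, hw⟩ := List.cons_prefix_iff.mp hpre
        have hdrop : u.drop jn = '*' :: u.drop (jn + 1) := by
          have hget : u[jn]? = some '*' := by
            rw [← List.head?_drop, hw.1]; rfl
          exact pvDropCons u jn hget
        have hjlen : jn < u.length := by
          by_contra hc
          rw [List.drop_eq_nil_of_le (by omega)] at hdrop
          simp at hdrop
        have hulen : u.length = cs.length - k := by rw [hu, List.length_drop]
        have hne : ¬ ((k : Int) + PySem.Chars.find u ['*'] = -1) := by
          rw [hjcast]; omega
        simp only [pvFindLoop, if_neg hne]
        have hc1 : (k : Int) + PySem.Chars.find u ['*'] + 1 = ((k + jn + 1 : Nat) : Int) := by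
          rw [hjcast]; push_cast; ring
        rw [hc1, ih (k + jn + 1) (by omega) (by omega)]
        have hhead : ((k : Int) + PySem.Chars.find u ['*']) = ((k + jn : Nat) : Int) := by
          rw [hjcast]; push_cast; ring
        rw [hhead]
        -- now both sides
        have hnostar : '*' ∉ u.take jn := by
          intro hmem
          obtain ⟨i, hi, hgi⟩ := List.getElem_of_mem hmem
          have hilt : i < jn := by
            have := hi; rw [List.length_take] at this; omega
          apply hmin i hilt
          have hget : u[i]? = some '*' := by
            have h' : (u.take jn)[i]? = some '*' := by
              rw [List.getElem?_eq_getElem hi]; exact congrArg some hgi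
            rwa [List.getElem?_take_of_lt hilt] at h'
          rw [pvDropCons u i hget]
          exact ⟨u.drop (i + 1), rfl⟩
        have hsplit : u = u.take jn ++ '*' :: u.drop (jn + 1) := by
          conv_lhs => rw [← List.take_append_drop jn u]
          rw [hdrop]
        have hdd : u.drop (jn + 1) = cs.drop (k + jn + 1) := by
          rw [hu, List.drop_drop]
          rfl
        conv_rhs => rw [hsplit]
        rw [pvStars_append _ _ _ hnostar]
        have hlt : (u.take jn).length = jn := by
          rw [List.length_take]; omega
        rw [hlt]
        have hstar : pvStars ('*' :: u.drop (jn + 1)) (k + jn)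
            = ((k + jn : Nat) : Int) :: pvStars (u.drop (jn + 1)) (k + jn + 1) := by
          simp [pvStars]
        rw [hstar, hdd]
  
theorem pvExtract_eq (u : List Char) : ∀ (k m : Nat) (cs : List Char), k ≤ m → cs.drop m = u →
    pvExtract cs ((k : Int) :: pvStars u m)
      = String.mk ((((cs.drop k).take (m - k)) ++ (pvSp u).1).filter (· ≠ '*'))
          :: ((pvSp u).2).map String.mk := by
  induction u with
  | nil =>
      intro k m cs hkm hdrop
      have hlen : cs.length ≤ m := by
        have h1 := congrArg List.length hdrop
        simp at h1
        omega
      simp only [pvStars, pvExtract, pvSp, List.append_nil, List.map_nil]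
      rw [PySem.Chars.slice_eq_listSlice, PySem.List.slice_from_natCast, pvRepFilter]
      rw [List.take_of_length_le (by rw [List.length_drop]; omega)]
  | cons c u' ih =>
      intro k m cs hkm hdrop
      have hdrop' : cs.drop (m + 1) = u' := by
        rw [← List.tail_drop, hdrop]
        rfl
      by_cases hc : c = '*'
      · subst hc
        have hstars : pvStars ('*' :: u') m = (m : Int) :: pvStars u' (m + 1) := by
          simp [pvStars]
        have hsp : pvSp ('*' :: u') = ([], (pvSp u').1 :: (pvSp u').2) := by
          simp [pvSp]
        rw [hstars, hsp]
        simp only [pvExtract]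
        rw [PySem.Chars.slice_eq_listSlice, PySem.List.slice_natCast, pvRepFilter]
        rw [ih m (m + 1) cs (by omega) hdrop']
        have htake1 : (cs.drop m).take (m + 1 - m) = ['*'] := by
          rw [hdrop]; simp
        rw [htake1]
        simp [pvSp_fst_no_star]
      · have hstars : pvStars (c :: u') m = pvStars u' (m + 1) := by
          simp [pvStars, hc]
        have hsp1 : (pvSp (c :: u')).1 = c :: (pvSp u').1 := by simp [pvSp, hc]
        have hsp2 : (pvSp (c :: u')).2 = (pvSp u').2 := by simp [pvSp, hc]
        rw [hstars, hsp1, hsp2, ih k (m + 1) cs (by omega) hdrop']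
        have hmlt : m < cs.length := by
          by_contra hcl
          rw [List.drop_eq_nil_of_le (by omega)] at hdrop
          simp at hdrop
        have hgetm : (cs.drop k)[m - k]? = some c := by
          rw [List.getElem?_drop]
          have : k + (m - k) = m := by omega
          rw [this, ← List.head?_drop, hdrop]; rfl
        have htake : (cs.drop k).take (m + 1 - k) = (cs.drop k).take (m - k) ++ [c] := by
          have h1 : m + 1 - k = (m - k) + 1 := by omega
          rw [h1, List.take_succ, hgetm]
          rfl
        rw [htake]
        congr 2
        simp [List.filter_append, List.append_assoc, List.filter, hc]

theorem pvFoldB (cs : List Char) : ∀ (res : List String) (buf : List Char),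
    (cs.foldl pvStep (res, buf)).1 ++ [String.mk (cs.foldl pvStep (res, buf)).2]
      = res ++ String.mk (buf ++ (pvSp cs).1) :: ((pvSp cs).2).map String.mk := by
  induction cs with
  | nil => intro res buf; simp [pvSp]
  | cons c cs ih =>
      intro res buf
      by_cases hc : c = '*'
      · subst hc
        have hstep : pvStep (res, buf) '*' = (res ++ [String.mk buf], []) := by
          simp [pvStep]
        rw [List.foldl_cons, hstep, ih (res ++ [String.mk buf]) []]
        simp [pvSp]
      · have hstep : pvStep (res, buf) c = (res, buf ++ [c]) := by
          simp [pvStep, hc]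
        rw [List.foldl_cons, hstep, ih res (buf ++ [c])]
        simp [pvSp, hc]

-- ===== VERDICT (by name: the statement is the Claim_ definition above) =====
theorem return_extracted_word_spec : Claim_equal_return_extracted_word := by
  intro s _
  unfold Spec_return_extracted_word return_extracted_word return_extracted_word_alt pvFindAll
  have hfind : PySem.Chars.find s.toList ['*']
      = PySem.Chars.findFrom s.toList ['*'] ((0 : Nat) : Int) := by
    rw [Nat.cast_zero, PySem.Chars.findFrom_zero]
  rw [hfind, pvLoop_eq s.toList (s.toList.length + 1) 0 (by omega) (by omega)]
  rw [List.drop_zero]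
  have h0 : ((0 : Int) :: pvStars s.toList 0) = (((0 : Nat) : Int) :: pvStars s.toList 0) := by
    norm_num
  rw [h0, pvExtract_eq s.toList 0 0 s.toList le_rfl (by simp)]
  have hB := pvFoldB s.toList [] []
  simp only [List.nil_append] at hB
  simp only [hB]
  simp [pvSp_fst_no_star]
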